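-- pv_equiv track=rewrite | github.com/roctbb/ai-game-engine | games/knight_duel/engine.py | _placements
-- ===== SOURCE A (Python) =====
-- _SLOTS = ("white", "black")
--
-- def _placements(role_team: dict[str, str], slot_scores: dict[str, int]) -> dict[str, int]:
--     ordered = sorted(_SLOTS, key=lambda slot: slot_scores[slot], reverse=True)
--     result: dict[str, int] = {}
--     last_score: int | None = None
--     last_place = 0
--     for index, slot in enumerate(ordered, start=1):
--         score = slot_scores[slot]
--         if score != last_score:
--             last_place = index
--             last_score = score
--         result[role_team[slot]] = last_place
--     return result
-- ===== SOURCE B (Python) =====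
-- def _placements(role_team: dict[str, str], slot_scores: dict[str, int]) -> dict[str, int]:
--     ws = slot_scores["white"]
--     bs = slot_scores["black"]
--     wt = role_team["white"]
--     bt = role_team["black"]
--     if bs > ws:
--         return {bt: 1, wt: 2}
--     if ws > bs:
--         return {wt: 1, bt: 2}
--     return {wt: 1, bt: 1}
-- ===== Notes on version B (the rewrite author's own statement) =====
-- stated objective: simpler
-- what changed: Replaces the sort + enumerate ranking loop with a closed-form three-way comparison of the two slots' scores, building the two-entry result dict directly in the same insertion order.
import Mathlib
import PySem

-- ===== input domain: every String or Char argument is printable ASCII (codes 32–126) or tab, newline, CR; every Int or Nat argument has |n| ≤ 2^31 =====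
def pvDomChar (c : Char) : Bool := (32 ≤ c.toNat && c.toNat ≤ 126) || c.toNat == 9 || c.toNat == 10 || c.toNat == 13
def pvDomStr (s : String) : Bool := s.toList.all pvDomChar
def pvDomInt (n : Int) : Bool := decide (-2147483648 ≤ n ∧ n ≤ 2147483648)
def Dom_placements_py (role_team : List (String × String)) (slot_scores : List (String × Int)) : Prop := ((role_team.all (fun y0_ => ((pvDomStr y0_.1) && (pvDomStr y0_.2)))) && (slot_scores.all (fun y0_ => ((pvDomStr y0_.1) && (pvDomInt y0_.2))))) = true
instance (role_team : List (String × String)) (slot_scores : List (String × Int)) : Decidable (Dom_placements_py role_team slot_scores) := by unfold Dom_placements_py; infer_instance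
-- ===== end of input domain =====

-- B replaces A's sort + enumerate ranking loop by a closed-form three-way comparison
-- of the two slots' scores (objective: simpler).

-- ===== PORT A =====
-- first-match association-list lookup (dict subscript d[k]; exact under Pre_, which
-- guarantees the key is present — Python raises KeyError otherwise)
def lookD {α : Type} [Inhabited α] (d : List (String × α)) (k : String) : α :=
  (d.lookup k).getD default

def placements_py (role_team : List (String × String)) (slot_scores : List (String × Int)) : List (String × Int) :=
  let ordered := PySem.List.sorted ["white", "black"] (fun slot => lookD slot_scores slot) true
  let final := (PySem.List.enumerate ordered 1).foldl
    (fun (st : PySem.Dict String Int × Option Int × Int) (p : Int × String) =>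
      let result := st.1
      let last_score := st.2.1
      let last_place := st.2.2
      let score := lookD slot_scores p.2
      let (last_place, last_score) :=
        if some score ≠ last_score then (p.1, some score) else (last_place, last_score)
      (result.insert (lookD role_team p.2) last_place, last_score, last_place))
    (PySem.Dict.empty, none, 0)
  final.1.items

-- ===== PORT B =====
def placements_py_alt (role_team : List (String × String)) (slot_scores : List (String × Int)) : List (String × Int) :=
  let ws := lookD slot_scores "white"
  let bs := lookD slot_scores "black"
  let wt := lookD role_team "white"
  let bt := lookD role_team "black"
  if bs > ws then ((PySem.Dict.empty.insert bt 1).insert wt 2).items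
  else if ws > bs then ((PySem.Dict.empty.insert wt 1).insert bt 2).items
  else ((PySem.Dict.empty.insert wt 1).insert bt 1).items

-- ===== PRECONDITION & SPEC =====
-- Pre_ excludes exactly the inputs on which A raises KeyError: one of the four
-- subscripts slot_scores["white"/"black"], role_team["white"/"black"] misses.
def Pre_placements_py (role_team : List (String × String)) (slot_scores : List (String × Int)) : Prop :=
  (slot_scores.lookup "white").isSome = true ∧ (slot_scores.lookup "black").isSome = true ∧
  (role_team.lookup "white").isSome = true ∧ (role_team.lookup "black").isSome = true
instance (role_team : List (String × String)) (slot_scores : List (String × Int)) : Decidable (Pre_placements_py role_team slot_scores) := by unfold Pre_placements_py; infer_instance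

def pvWitness_placements_py : (List (String × String)) × (List (String × Int)) :=
  ([("white", "alpha"), ("black", "beta")], [("white", 3), ("black", 5)])

def Spec_placements_py (role_team : List (String × String)) (slot_scores : List (String × Int)) (out : List (String × Int)) : Prop := out = placements_py_alt role_team slot_scores
instance (role_team : List (String × String)) (slot_scores : List (String × Int)) (out : List (String × Int)) : Decidable (Spec_placements_py role_team slot_scores out) := by unfold Spec_placements_py; infer_instance

-- ===== CLAIM (what is proved, stated in full; the proofs are below) =====
def Claim_equal_placements_py : Prop := ∀ (role_team : List (String × String)) (slot_scores : List (String × Int)), Dom_placements_py role_team slot_scores → Pre_placements_py role_team slot_scores → Spec_placements_py role_team slot_scores (placements_py role_team slot_scores)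

-- ===== LEMMAS AND PROOFS =====

-- Python's reverse stable sort of the two-slot tuple, in closed form.
theorem sorted_two_slots (key : String → Int) :
    PySem.List.sorted ["white", "black"] key true =
    if key "black" > key "white" then ["black", "white"] else ["white", "black"] := by
  simp only [PySem.List.sorted_rev_eq_foldl_insertBy, List.foldl, PySem.List.insertBy]
  split_ifs with h1 h2 <;> simp_all

-- ===== VERDICT (by name: the statement is the Claim_ definition above) =====
theorem placements_py_spec : Claim_equal_placements_py := by
  intro role_team slot_scores _ _
  unfold Spec_placements_py placements_py placements_py_alt
  rw [sorted_two_slots]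
  set ws := lookD slot_scores "white" with hws
  set bs := lookD slot_scores "black" with hbs
  rcases lt_trichotomy ws bs with h | h | h
  · rw [if_pos h]
    simp [PySem.List.enumerate, List.foldl, ← hws, ← hbs, ne_of_lt h, h]
  · rw [if_neg (by omega)]
    simp [PySem.List.enumerate, List.foldl, ← hws, ← hbs, h]
  · rw [if_neg (by omega)]
    simp [PySem.List.enumerate, List.foldl, ← hws, ← hbs, ne_of_lt h, h, not_lt.mpr (le_of_lt h)]
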